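-- pv_equiv track=rewrite | github.com/vuanhtuan1012/algorithms | thuat_toan_co_ban/xu_ly_xau/strings_crossover.py | count_crossover
-- ===== SOURCE A (Python) =====
-- from typing import List
--
-- def is_crossover(first_string: str, second_string: str, result: str) -> bool:
--     """
--     Returns True if result is the result of crossover operator between two strings
--     otherwise, return False
--     """
--     length = len(first_string)
--     if length != len(second_string) or length != len(result):
--         return False
--
--     for i in range(length):
--         if result[i] not in (first_string[i], second_string[i]):
--             return False
--     return True
--
-- def count_crossover(array: List[str], result: str) -> int:
--     """
--     Returns the number of pairs of strings in array for which
--     the operation crossover on them results in result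
--     """
--     no_strings = len(array)
--     no_pairs = 0
--     for i in range(no_strings - 1):
--         first_string = array[i]
--         for j in range(i + 1, no_strings):
--             if is_crossover(first_string, array[j], result):
--                 no_pairs += 1
--     return no_pairs
-- ===== SOURCE B (Python) =====
-- def count_crossover(array, result):
--     """
--     Count pairs of strings whose per-position crossover can yield result.
--     Precompute, per string of the right length, the set of positions where it
--     mismatches result; a pair works iff their mismatch sets are disjoint.
--     """
--     L = len(result)
--     keys = []
--     for s in array:
--         if len(s) == L:
--             keys.append(frozenset(k for k in range(L) if s[k] != result[k]))
--     total = 0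
--     rest = keys
--     while rest:
--         first = rest[0]
--         rest = rest[1:]
--         total += sum(1 for other in rest if first.isdisjoint(other))
--     return total
-- ===== Notes on version B (the rewrite author's own statement) =====
-- stated objective: faster
-- what changed: B precomputes for each right-length string the frozenset of positions where it mismatches result, then counts pairs whose mismatch sets are disjoint, instead of re-scanning all positions of both strings for every pair.
import Mathlib
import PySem

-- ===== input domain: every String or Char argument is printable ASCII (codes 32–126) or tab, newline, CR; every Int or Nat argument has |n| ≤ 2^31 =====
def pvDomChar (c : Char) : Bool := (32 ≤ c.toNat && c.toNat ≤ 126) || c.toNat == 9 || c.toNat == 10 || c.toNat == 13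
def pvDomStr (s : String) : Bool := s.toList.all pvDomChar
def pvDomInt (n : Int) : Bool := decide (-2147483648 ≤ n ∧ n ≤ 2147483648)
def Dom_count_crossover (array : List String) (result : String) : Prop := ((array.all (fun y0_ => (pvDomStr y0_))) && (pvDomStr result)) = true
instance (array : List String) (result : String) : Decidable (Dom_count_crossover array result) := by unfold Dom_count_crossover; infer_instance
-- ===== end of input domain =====

-- B precomputes, for each string of the right length, the set of positions where it
-- mismatches `result`, and counts pairs with disjoint mismatch sets (objective: faster
-- pair test; equivalence proved for all inputs in the domain).

-- ===== PORT A =====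
def is_crossover (first_string second_string result : String) : Bool :=
  let length : Int := PySem.Str.len first_string
  if length ≠ PySem.Str.len second_string ∨ length ≠ PySem.Str.len result then false
  else
    -- 'for i in range(length): if result[i] not in (first[i], second[i]): return False' / 'return True'
    (PySem.List.pyRange 0 length 1).all (fun i =>
      PySem.Str.pyGet? result i == PySem.Str.pyGet? first_string i ||
      PySem.Str.pyGet? result i == PySem.Str.pyGet? second_string i)

def count_crossover (array : List String) (result : String) : Int :=
  let no_strings : Int := PySem.List.len array
  (PySem.List.pyRange 0 (no_strings - 1) 1).foldl (fun no_pairs i =>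
    let first_string := PySem.List.pyGetD array i ""
    (PySem.List.pyRange (i + 1) no_strings 1).foldl (fun acc j =>
      if is_crossover first_string (PySem.List.pyGetD array j "") result then acc + 1 else acc)
      no_pairs) 0

-- ===== PORT B =====
-- frozenset(k for k in range(L) if s[k] != result[k])
def mismatchKey (s result : String) : PySem.Set Int :=
  PySem.Set.ofList ((PySem.List.pyRange 0 (PySem.Str.len result) 1).filter
    (fun k => !(PySem.Str.pyGet? s k == PySem.Str.pyGet? result k)))

-- the 'while rest: first = rest[0]; rest = rest[1:]; total += sum(…)' loop
def altPairsLoop : List (PySem.Set Int) → Int → Int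
  | [], total => total
  | first :: rest, total =>
      altPairsLoop rest
        (total + rest.foldl (fun acc other =>
          if PySem.Set.isdisjoint first other then acc + 1 else acc) 0)

def count_crossover_alt (array : List String) (result : String) : Int :=
  let L : Int := PySem.Str.len result
  let keys := array.foldl (fun ks s =>
    if PySem.Str.len s = L then ks ++ [mismatchKey s result] else ks) []
  altPairsLoop keys 0

-- ===== PRECONDITION & SPEC =====
def Spec_count_crossover (array : List String) (result : String) (out : Int) : Prop := out = count_crossover_alt array result
instance (array : List String) (result : String) (out : Int) : Decidable (Spec_count_crossover array result out) := by unfold Spec_count_crossover; infer_instance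

-- ===== CLAIM (what is proved, stated in full; the proofs are below) =====
def Claim_equal_count_crossover : Prop := ∀ (array : List String) (result : String), Dom_count_crossover array result → Spec_count_crossover array result (count_crossover array result)

-- ===== LEMMAS AND PROOFS =====

/-- Unordered-pair count: for each element, count later partners accepted by `f`. -/
def pairCountN {α : Type} (f : α → α → Bool) : List α → Nat
  | [] => 0
  | x :: xs => xs.countP (f x) + pairCountN f xs

theorem altPairsLoop_eq (l : List (PySem.Set Int)) (t : Int) :
    altPairsLoop l t = t + (pairCountN (fun u v => PySem.Set.isdisjoint u v) l : Nat) := by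
  induction l generalizing t with
  | nil => simp [altPairsLoop, pairCountN]
  | cons x xs ih =>
    rw [altPairsLoop, ih, PySem.List.foldl_count_if, pairCountN]
    push_cast
    ring

/-- B computes the pair count over the list of mismatch keys of the right-length strings. -/
theorem alt_eq_pairCount (array : List String) (result : String) :
    count_crossover_alt array result =
      (pairCountN (fun u v => PySem.Set.isdisjoint u v)
        (((array.filter (fun s => PySem.Str.len s == PySem.Str.len result)).map
          (fun s => mismatchKey s result))) : Nat) := by
  show altPairsLoop (array.foldl (fun ks s =>
      if PySem.Str.len s = PySem.Str.len result then ks ++ [mismatchKey s result] else ks) []) 0 = _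
  rw [PySem.List.foldl_congr_mem _ _
    (fun (ks : List (PySem.Set Int)) s => if (PySem.Str.len s == PySem.Str.len result) = true then
        ks ++ [mismatchKey s result] else ks) []
    (by intro ks s _; simp only [beq_iff_eq])]
  rw [PySem.List.foldl_append_if, altPairsLoop_eq]
  simp

/-- Sum-over-suffixes form of the pair count (full range; the last term is 0). -/
theorem sum_suffix_counts {α : Type} (f : α → α → Bool) (d : α) (xs : List α) :
    ((List.range xs.length).map
      (fun k => (xs.drop (k+1)).countP (f (xs.getD k d)))).sum = pairCountN f xs := by
  induction xs with
  | nil => simp [pairCountN]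
  | cons x t ih =>
    rw [List.length_cons, List.range_succ_eq_map, pairCountN, ← ih]
    simp only [List.map_cons, List.map_map, List.sum_cons, List.drop_succ_cons, List.drop_zero,
      List.getD_cons_zero]
    congr 1

/-- A's nested index loops compute the pair count of `is_crossover · · result`. -/
theorem a_eq_pairCount (array : List String) (result : String) :
    count_crossover array result =
      (pairCountN (fun a b => is_crossover a b result) array : Nat) := by
  unfold count_crossover
  rw [PySem.List.foldl_congr_mem _ _
    (fun (no_pairs : Int) (i : Int) =>
      no_pairs + ((array.drop (i+1).toNat).countP
        (fun s => is_crossover (PySem.List.pyGetD array i "") s result) : Nat)) 0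
    (by
      intro acc i hi
      have h0 : (0:Int) ≤ i + 1 := by
        have := (PySem.List.mem_pyRange_one.mp hi).1; omega
      simp only []
      rw [show PySem.List.len array = ((array.length : Int)) from rfl,
        PySem.List.foldl_pyRange_pyGetD' array ""
          (fun acc2 s => if is_crossover (PySem.List.pyGetD array i "") s result
            then acc2 + 1 else acc2) acc h0,
        PySem.List.foldl_count_if])]
  rw [PySem.List.foldl_add]
  rw [← sum_suffix_counts (fun a b => is_crossover a b result) "" array]
  rw [show PySem.List.len array = ((array.length : Int)) from rfl, PySem.List.pyRange_one]
  rcases array with _ | ⟨x, t⟩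
  · simp
  · have hlen : ((((x :: t).length : Int)) - 1 - 0).toNat = t.length := by
      simp
    rw [hlen, List.length_cons, List.range_succ, List.map_append, List.sum_append,
      List.map_map]
    have hlast : ((x :: t).drop (t.length + 1)).countP
        (fun b => is_crossover ((x :: t).getD t.length "") b result) = 0 := by
      simp
    simp only [List.map_cons, List.map_nil, List.sum_cons, List.sum_nil]
    rw [hlast]
    simp only [add_zero, zero_add]
    rw [Nat.cast_list_sum, List.map_map]
    apply congrArg List.sum
    apply List.map_congr_left
    intro k hk
    simp only [Function.comp]
    rw [show PySem.List.pyGetD (x :: t) ((k : Nat) : Int) "" = (x :: t).getD k "" by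
      simp [PySem.List.pyGetD_natCast, List.getD]]
    rw [show (((k : Nat) : Int) + 1).toNat = k + 1 by omega]

/-- When both strings have `result`'s length, A's positionwise test is mismatch-set disjointness. -/
theorem cross_eq_disjoint (a b result : String)
    (ha : PySem.Str.len a = PySem.Str.len result)
    (hb : PySem.Str.len b = PySem.Str.len result) :
    is_crossover a b result = PySem.Set.isdisjoint (mismatchKey a result) (mismatchKey b result) := by
  unfold is_crossover
  rw [if_neg (by omega)]
  rw [ha]
  rw [Bool.eq_iff_iff, List.all_eq_true, PySem.Set.isdisjoint_iff]
  constructor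
  · intro h x hx hx'
    rw [mismatchKey, PySem.Set.mem_ofList, List.mem_filter] at hx hx'
    have := h x hx.1
    simp only [Bool.or_eq_true, beq_iff_eq] at this
    rcases this with h1 | h1
    · have hx2 := hx.2
      simp only [Bool.not_eq_true', beq_eq_false_iff_ne] at hx2
      exact hx2 h1.symm
    · have hx2 := hx'.2
      simp only [Bool.not_eq_true', beq_eq_false_iff_ne] at hx2
      exact hx2 h1.symm
  · intro h i hi
    by_cases h1 : PySem.Str.pyGet? result i = PySem.Str.pyGet? a i
    · rw [h1]; simp
    by_cases h2 : PySem.Str.pyGet? result i = PySem.Str.pyGet? b i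
    · rw [h2]; simp
    exfalso
    apply h i
    · rw [mismatchKey, PySem.Set.mem_ofList, List.mem_filter]
      exact ⟨hi, by simpa using Ne.symm h1⟩
    · rw [mismatchKey, PySem.Set.mem_ofList, List.mem_filter]
      exact ⟨hi, by simpa using Ne.symm h2⟩

/-- Strings of the wrong length never form a crossover pair. -/
theorem cross_false_of_badlen (a b result : String)
    (h : ¬ PySem.Str.len a = PySem.Str.len result ∨ ¬ PySem.Str.len b = PySem.Str.len result) :
    is_crossover a b result = false := by
  unfold is_crossover
  rcases h with h | h
  · rw [if_pos (Or.inr h)]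
  · by_cases h2 : PySem.Str.len a = PySem.Str.len result
    · rw [if_pos (Or.inl (by omega))]
    · rw [if_pos (Or.inr h2)]

/-- Transfer: the pair count of A's test over `array` equals the pair count of
    disjointness over the mapped-and-filtered mismatch keys. -/
theorem pairCount_transfer (result : String) (xs : List String) :
    pairCountN (fun a b => is_crossover a b result) xs =
      pairCountN (fun u v => PySem.Set.isdisjoint u v)
        ((xs.filter (fun s => PySem.Str.len s == PySem.Str.len result)).map
          (fun s => mismatchKey s result)) := by
  induction xs with
  | nil => rfl
  | cons x t ih =>
    by_cases hx : PySem.Str.len x = PySem.Str.len result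
    · rw [pairCountN, show (x :: t).filter (fun s => PySem.Str.len s == PySem.Str.len result)
          = x :: t.filter (fun s => PySem.Str.len s == PySem.Str.len result) by
        rw [List.filter_cons_of_pos (by rw [beq_iff_eq]; exact hx)]]
      rw [List.map_cons, pairCountN, ih]
      congr 1
      rw [List.countP_map, List.countP_filter]
      apply List.countP_congr
      intro b _
      by_cases hbl : PySem.Str.len b = PySem.Str.len result
      · have hcd := cross_eq_disjoint x b result hx hbl
        have hb2 : (PySem.Str.len b == PySem.Str.len result) = true := by
          rw [beq_iff_eq]; exact hbl
        simp only [Function.comp]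
        rw [hcd, hb2, Bool.and_true]
      · have hb2 : (PySem.Str.len b == PySem.Str.len result) = false := by
          rw [beq_eq_false_iff_ne]; exact hbl
        rw [cross_false_of_badlen x b result (Or.inr hbl)]
        simp only [Function.comp]
        rw [hb2, Bool.and_false]
    · rw [pairCountN, show (x :: t).filter (fun s => PySem.Str.len s == PySem.Str.len result)
          = t.filter (fun s => PySem.Str.len s == PySem.Str.len result) by
        rw [List.filter_cons_of_neg (by simp only [beq_iff_eq]; exact hx)]]
      rw [ih]
      have : t.countP (fun b => is_crossover x b result) = 0 := by
        rw [List.countP_eq_zero]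
        intro b _
        simp [cross_false_of_badlen x b result (Or.inl hx)]
      omega

-- ===== VERDICT (by name: the statement is the Claim_ definition above) =====
theorem count_crossover_spec : Claim_equal_count_crossover := by
  intro array result _
  unfold Spec_count_crossover
  rw [a_eq_pairCount, alt_eq_pairCount, pairCount_transfer]
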